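-- pv_equiv track=rewrite | github.com/JoachimLundgren/AdventOfCode2024 | AdventOfCode/Day23/day23.py | expandSet
-- ===== SOURCE A (Python) =====
-- def expandSet(connections, lans):
--     newLans = set()
--
--     for lan in lans:
--         for k, v in connections.items():
--             if all(computer in v for computer in lan):
--                 newLan = list(lan) + [k]
--                 newLan.sort()
--                 newLans.add(tuple(newLan))
--
--     return newLans
-- ===== SOURCE B (Python) =====
-- def expandSet(connections, lans):
--     # Build a reverse index: member -> keys whose neighbor list contains it,
--     # then for each lan intersect those key lists instead of scanning every connection.
--     keys = list(connections)
--     rev = {}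
--     for k, v in connections.items():
--         for m in v:
--             rev.setdefault(m, []).append(k)
--     newLans = set()
--     for lan in lans:
--         cands = keys
--         for m in lan:
--             members = set(rev.get(m, ()))
--             cands = [k for k in cands if k in members]
--         for k in cands:
--             newLans.add(tuple(sorted(list(lan) + [k])))
--     return newLans
-- ===== Notes on version B (the rewrite author's own statement) =====
-- stated objective: faster
-- what changed: Instead of testing every connection's neighbour list against every lan, B builds a reverse index (member -> keys whose neighbour list contains it) once and, per lan, intersects those key lists so only common-neighbour candidates are visited.
import Mathlib
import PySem

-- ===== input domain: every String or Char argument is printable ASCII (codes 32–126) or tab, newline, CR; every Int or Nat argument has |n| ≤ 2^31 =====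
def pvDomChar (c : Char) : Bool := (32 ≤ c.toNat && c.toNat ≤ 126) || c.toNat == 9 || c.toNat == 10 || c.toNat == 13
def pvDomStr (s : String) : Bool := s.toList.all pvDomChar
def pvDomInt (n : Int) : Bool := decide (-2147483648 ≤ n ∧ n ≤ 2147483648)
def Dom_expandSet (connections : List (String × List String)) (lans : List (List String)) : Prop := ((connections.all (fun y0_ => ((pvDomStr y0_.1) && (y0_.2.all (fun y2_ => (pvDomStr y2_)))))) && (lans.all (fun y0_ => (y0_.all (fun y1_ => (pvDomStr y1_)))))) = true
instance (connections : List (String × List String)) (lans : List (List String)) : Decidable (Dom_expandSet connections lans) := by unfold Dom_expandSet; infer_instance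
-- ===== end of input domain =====

-- B replaces A's scan of every connection per lan by a reverse index (member -> keys listing it)
-- whose per-member key lists are intersected, so only common neighbours are candidates (objective: faster).

-- ===== PORT A =====
def expandSet (connections : List (String × List String)) (lans : List (List String)) : List (List String) :=
  let d := PySem.Dict.ofList connections
  lans.foldl (fun newLans lan =>
    d.items.foldl (fun newLans kv =>
      if lan.all (fun computer => kv.2.contains computer) then
        PySem.Set.add newLans (PySem.List.sorted (lan ++ [kv.1]) (fun x => x) false)
      else newLans) newLans) PySem.Set.empty

-- ===== PORT B =====
def expandSet_alt (connections : List (String × List String)) (lans : List (List String)) : List (List String) :=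
  let d := PySem.Dict.ofList connections
  let keys := d.keys
  let rev : PySem.Dict String (List String) :=
    d.items.foldl (fun rev kv =>
      kv.2.foldl (fun rev m => rev.modify m [] (fun l => l ++ [kv.1])) rev) PySem.Dict.empty
  lans.foldl (fun newLans lan =>
    let cands := lan.foldl (fun cands m =>
      let members := PySem.Set.ofList (rev.getD m [])
      cands.filter (fun k => members.contains k)) keys
    cands.foldl (fun newLans k =>
      PySem.Set.add newLans (PySem.List.sorted (lan ++ [k]) (fun x => x) false)) newLans) PySem.Set.empty

-- ===== PRECONDITION & SPEC =====
def Spec_expandSet (connections : List (String × List String)) (lans : List (List String)) (out : List (List String)) : Prop := out = expandSet_alt connections lans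
instance (connections : List (String × List String)) (lans : List (List String)) (out : List (List String)) : Decidable (Spec_expandSet connections lans out) := by unfold Spec_expandSet; infer_instance

-- ===== CLAIM (what is proved, stated in full; the proofs are below) =====
def Claim_equal_expandSet : Prop := ∀ (connections : List (String × List String)) (lans : List (List String)), Dom_expandSet connections lans → Spec_expandSet connections lans (expandSet connections lans)

-- ===== LEMMAS AND PROOFS =====

-- membership in the reverse index after folding one neighbour list
theorem pv_rev_inner (v : List String) (k0 : String) (r0 : PySem.Dict String (List String))
    (m k : String) :
    (k ∈ (v.foldl (fun r m' => r.modify m' [] (fun l => l ++ [k0])) r0).getD m []) ↔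
      (k ∈ r0.getD m [] ∨ (k = k0 ∧ m ∈ v)) := by
  induction v generalizing r0 with
  | nil => simp
  | cons a v ih =>
    simp only [List.foldl_cons]
    rw [ih]
    by_cases h : a = m
    · subst h
      rw [PySem.Dict.getD_modify_self]
      simp only [List.mem_append, List.mem_cons]
      tauto
    · rw [PySem.Dict.getD_modify_of_ne _ _ _ (Ne.symm h)]
      simp only [List.mem_cons]
      constructor
      · tauto
      · rintro (h1 | ⟨rfl, (rfl | h2)⟩)
        · exact Or.inl h1
        · exact absurd rfl h
        · exact Or.inr ⟨rfl, h2⟩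

-- membership in the reverse index after folding a list of entries
theorem pv_rev_build (L : List (String × List String)) (r0 : PySem.Dict String (List String))
    (m k : String) :
    (k ∈ (L.foldl (fun r kv => kv.2.foldl (fun r m' => r.modify m' [] (fun l => l ++ [kv.1])) r) r0).getD m []) ↔
      (k ∈ r0.getD m [] ∨ ∃ v, (k, v) ∈ L ∧ m ∈ v) := by
  induction L generalizing r0 with
  | nil => simp
  | cons a L ih =>
    obtain ⟨k0, v0⟩ := a
    simp only [List.foldl_cons]
    rw [ih, pv_rev_inner]
    simp only [List.mem_cons, Prod.mk.injEq]
    constructor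
    · rintro (⟨h1 | ⟨rfl, h2⟩⟩ | ⟨v, hv, hm⟩)
      · exact Or.inl h1
      · exact Or.inr ⟨v0, Or.inl ⟨rfl, rfl⟩, h2⟩
      · exact Or.inr ⟨v, Or.inr hv, hm⟩
    · rintro (h1 | ⟨v, (⟨rfl, rfl⟩ | hv), hm⟩)
      · exact Or.inl (Or.inl h1)
      · exact Or.inl (Or.inr ⟨rfl, hm⟩)
      · exact Or.inr ⟨v, hv, hm⟩

-- an if-add fold equals a fold over the filtered list
theorem pv_foldl_if_filter {α β : Type} (l : List α) (p : α → Bool) (f : β → α → β) (s : β) :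
    l.foldl (fun s x => if p x then f s x else s) s = (l.filter p).foldl f s := by
  induction l generalizing s with
  | nil => rfl
  | cons a l ih =>
    by_cases h : p a <;> simp [h, ih]

-- a chain of filters equals one filter with the conjunction
theorem pv_foldl_filter_all {α β : Type} (lan : List β) (p : β → α → Bool) (keys : List α) :
    lan.foldl (fun c m => c.filter (p m)) keys =
      keys.filter (fun k => lan.all (fun m => p m k)) := by
  induction lan generalizing keys with
  | nil => simp
  | cons m lan ih =>
    simp only [List.foldl_cons, ih, List.filter_filter, List.all_cons]
    apply List.filter_congr
    intro k _
    rw [Bool.and_comm]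

theorem pv_all_congr {α : Type} (l : List α) (p q : α → Bool) (h : ∀ x ∈ l, p x = q x) :
    l.all p = l.all q := by
  induction l with
  | nil => rfl
  | cons a l ih =>
    simp only [List.all_cons, h a (List.mem_cons_self), ih (fun x hx => h x (List.mem_cons_of_mem a hx))]

-- for an entry of the dict, membership of its key in the reverse index at m says m is among its neighbours
theorem pv_rev_mem (connections : List (String × List String)) (kv : String × List String)
    (hkv : kv ∈ (PySem.Dict.ofList connections).items) (m : String) :
    (kv.1 ∈ ((PySem.Dict.ofList connections).items.foldl
        (fun r kv => kv.2.foldl (fun r m' => r.modify m' [] (fun l => l ++ [kv.1])) r)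
        PySem.Dict.empty).getD m []) ↔ m ∈ kv.2 := by
  rw [pv_rev_build]
  simp only [PySem.Dict.getD_empty, List.not_mem_nil, false_or]
  constructor
  · rintro ⟨v, hv, hm⟩
    have h1 := PySem.Dict.get?_of_mem_items _ hv (PySem.Dict.nodup_keys_ofList connections)
    have h2 := PySem.Dict.get?_of_mem_items _ (show (kv.1, kv.2) ∈ _ from hkv) (PySem.Dict.nodup_keys_ofList connections)
    rw [h1] at h2
    rwa [← Option.some_inj.mp h2]
  · intro hm
    exact ⟨kv.2, hkv, hm⟩

theorem pv_inner_eq (connections : List (String × List String)) (lan : List String)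
    (s : PySem.Set (List String)) :
    ((PySem.Dict.ofList connections).items.foldl (fun newLans kv =>
      if lan.all (fun computer => kv.2.contains computer) then
        PySem.Set.add newLans (PySem.List.sorted (lan ++ [kv.1]) (fun x => x) false)
      else newLans) s) =
    ((lan.foldl (fun cands m =>
        cands.filter (fun k => PySem.Set.contains
          (PySem.Set.ofList (((PySem.Dict.ofList connections).items.foldl
            (fun r kv => kv.2.foldl (fun r m' => r.modify m' [] (fun l => l ++ [kv.1])) r)
            PySem.Dict.empty).getD m [])) k)) (PySem.Dict.ofList connections).keys).foldl
      (fun newLans k =>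
        PySem.Set.add newLans (PySem.List.sorted (lan ++ [k]) (fun x => x) false)) s) := by
  rw [pv_foldl_filter_all]
  have hkeys : (PySem.Dict.ofList connections).keys =
      (PySem.Dict.ofList connections).items.map Prod.fst := rfl
  rw [hkeys, List.filter_map, List.foldl_map, pv_foldl_if_filter]
  have hfil : ∀ kv ∈ (PySem.Dict.ofList connections).items,
      (lan.all (fun computer => kv.2.contains computer)) =
      ((fun k => lan.all (fun m => PySem.Set.contains
          (PySem.Set.ofList (((PySem.Dict.ofList connections).items.foldl
            (fun r kv => kv.2.foldl (fun r m' => r.modify m' [] (fun l => l ++ [kv.1])) r)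
            PySem.Dict.empty).getD m [])) k)) ∘ Prod.fst) kv := by
    intro kv hkv
    simp only [Function.comp]
    apply pv_all_congr
    intro m _
    simp only [PySem.Set.contains, PySem.Set.mem_ofList, List.contains_eq_mem]
    rw [decide_eq_decide.mpr (pv_rev_mem connections kv hkv m)]
  rw [List.filter_congr hfil]

-- ===== VERDICT (by name: the statement is the Claim_ definition above) =====
theorem expandSet_spec : Claim_equal_expandSet := by
  intro connections lans hdom
  clear hdom
  unfold Spec_expandSet expandSet expandSet_alt
  simp only
  induction lans using List.reverseRecOn with
  | nil => rfl
  | append_singleton lans lan ih =>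
    rw [List.foldl_append, List.foldl_append, ih, List.foldl_cons, List.foldl_cons,
      List.foldl_nil, List.foldl_nil, pv_inner_eq]
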